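-- pv_equiv track=rewrite | github.com/shinji-Yama77/AI415cse | a3-starter-code/syamasKInARow.py | X_O_diags_lines
-- ===== SOURCE A (Python) =====
-- def X_O_diags_lines(state, limit, player):
--     unblocked_instances = 0
--     num_rows = len(state)
--     num_cols = len(state[0])
--     for i in range(num_rows):
--         max_num_consecutive = 0 # check max number consecutive
--         in_player_consecutive = False
--         num_x = 0
--         num_consecutive = 0
--         num_spaces = 0
--         for j in range(num_cols):
--             if(state[i][j] == player):
--                 num_x += 1
--                 if (in_player_consecutive):
--                     num_consecutive += 1
--                     if (num_consecutive > max_num_consecutive):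
--                         max_num_consecutive = num_consecutive
--                     continue
--                 else:
--                     num_consecutive = 1
--                     if (num_consecutive >= max_num_consecutive):
--                         max_num_consecutive = num_consecutive # counting for one case
--                     in_player_consecutive = True
--             elif (state[i][j] != ' '):
--                 break
--             else:
--                 num_spaces += 1
--                 in_player_consecutive = False
--         if (max_num_consecutive == limit and num_spaces >= 1): # least number of spaces
--             unblocked_instances += 1
--
--     return unblocked_instances
-- ===== SOURCE B (Python) =====
-- def _prefix(row, num_cols, player):
--     # cells of the row up to (excluding) the first cell that is neither player nor space;
--     # indexes row[j] so a too-short row raises IndexError just like the original scan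
--     out = []
--     for j in range(num_cols):
--         c = row[j]
--         if c != player and c != ' ':
--             break
--         out.append(c)
--     return out
--
--
-- def _stats(cells, player):
--     # (best player-run, player-run at the head, spaces) of a blocker-free cell list
--     if not cells:
--         return (0, 0, 0)
--     best, head, spaces = _stats(cells[1:], player)
--     if cells[0] == player:
--         head += 1
--         return (max(best, head), head, spaces)
--     return (best, 0, spaces + 1)
--
--
-- def X_O_diags_lines(state, limit, player):
--     num_cols = len(state[0])
--     total = 0
--     for row in state:
--         best, _, spaces = _stats(_prefix(row, num_cols, player), player)
--         if best == limit and spaces >= 1: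
--             total += 1
--     return total
-- ===== Notes on version B (the rewrite author's own statement) =====
-- stated objective: alternative
-- what changed: Splits A's single imperative loop (break + in_player_consecutive flag + running max/consecutive bookkeeping) into prefix extraction followed by a structural recursion computing (best run, head run, spaces) bottom-up.
import Mathlib
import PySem

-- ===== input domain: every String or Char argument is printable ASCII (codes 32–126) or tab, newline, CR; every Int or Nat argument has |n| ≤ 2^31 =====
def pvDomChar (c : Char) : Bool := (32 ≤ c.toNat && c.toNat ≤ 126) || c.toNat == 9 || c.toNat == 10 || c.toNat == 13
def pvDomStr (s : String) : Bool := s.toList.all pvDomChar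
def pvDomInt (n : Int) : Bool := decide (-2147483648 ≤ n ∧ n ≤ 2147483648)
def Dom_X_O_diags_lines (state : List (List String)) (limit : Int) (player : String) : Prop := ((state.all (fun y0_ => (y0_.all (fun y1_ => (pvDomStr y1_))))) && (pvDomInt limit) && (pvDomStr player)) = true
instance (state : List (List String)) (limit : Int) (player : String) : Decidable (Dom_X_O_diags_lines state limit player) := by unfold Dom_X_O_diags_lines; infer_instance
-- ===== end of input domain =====

-- B replaces A's single imperative scan (break + in_player_consecutive flag + running max
-- bookkeeping) by prefix extraction followed by a structural recursion computing
-- (best run, head run, spaces) bottom-up; an alternative decomposition of the same cost.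

-- ===== PORT A =====
-- inner 'for j in range(num_cols)' loop with break; state (max_num_consecutive, in_player_consecutive, num_x, num_consecutive, num_spaces)
def aRowLoop (row : List String) (player : String) :
    List Nat → Int → Bool → Int → Int → Int → Int × Int
  | [], maxC, _, _, _, spaces => (maxC, spaces)
  | j :: js, maxC, inPl, numX, consec, spaces =>
    if row.getD j "" == player then
      if inPl then
        let consec' := consec + 1
        let maxC' := if consec' > maxC then consec' else maxC
        aRowLoop row player js maxC' inPl (numX + 1) consec' spaces
      else
        let consec' : Int := 1
        let maxC' := if consec' ≥ maxC then consec' else maxC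
        aRowLoop row player js maxC' true (numX + 1) consec' spaces
    else if row.getD j "" != " " then (maxC, spaces)
    else aRowLoop row player js maxC false numX consec (spaces + 1)

def X_O_diags_lines (state : List (List String)) (limit : Int) (player : String) : Int :=
  let numRows := state.length
  let numCols := (state.headD []).length
  (List.range numRows).foldl (fun acc i =>
    let res := aRowLoop (state.getD i []) player (List.range numCols) 0 false 0 0 0
    if res.1 = limit ∧ res.2 ≥ 1 then acc + 1 else acc) 0

-- ===== PORT B =====
-- _prefix: 'for j in range(num_cols)' reading row[j], stopping at the first blocker
def bPrefix (row : List String) (player : String) : List Nat → List String → List String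
  | [], out => out
  | j :: js, out =>
    let c := row.getD j ""
    if c != player && c != " " then out
    else bPrefix row player js (out ++ [c])

-- _stats: (best player-run, head player-run, spaces) of a blocker-free cell list
def bStats (player : String) : List String → Int × Int × Int
  | [] => (0, 0, 0)
  | c :: cs =>
    let r := bStats player cs
    if c == player then (max r.1 (r.2.1 + 1), r.2.1 + 1, r.2.2)
    else (r.1, 0, r.2.2 + 1)

def X_O_diags_lines_alt (state : List (List String)) (limit : Int) (player : String) : Int :=
  let numCols := (state.headD []).length
  state.foldl (fun total row =>
    let r := bStats player (bPrefix row player (List.range numCols) [])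
    if r.1 = limit ∧ r.2.2 ≥ 1 then total + 1 else total) 0

-- ===== PRECONDITION & SPEC =====
-- Pre_ excludes exactly the inputs where A (and B alike) raises IndexError: empty state
-- (state[0]), and a row shorter than num_cols whose cells are all player/space (the scan
-- indexes past its end before any break).
def Pre_X_O_diags_lines (state : List (List String)) (limit : Int) (player : String) : Prop :=
  state ≠ [] ∧ ∀ row ∈ state, (state.headD []).length ≤ row.length ∨ ∃ c ∈ row, (c ≠ player ∧ c ≠ " ")
instance (state : List (List String)) (limit : Int) (player : String) : Decidable (Pre_X_O_diags_lines state limit player) := by unfold Pre_X_O_diags_lines; infer_instance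

def pvWitness_X_O_diags_lines : List (List String) × Int × String :=
  ([["X", " ", "X", "X"], ["O", "X"], [" ", " ", "O", "X"]], 2, "X")

def Spec_X_O_diags_lines (state : List (List String)) (limit : Int) (player : String) (out : Int) : Prop := out = X_O_diags_lines_alt state limit player
instance (state : List (List String)) (limit : Int) (player : String) (out : Int) : Decidable (Spec_X_O_diags_lines state limit player out) := by unfold Spec_X_O_diags_lines; infer_instance

-- ===== CLAIM (what is proved, stated in full; the proofs are below) =====
def Claim_equal_X_O_diags_lines : Prop := ∀ (state : List (List String)) (limit : Int) (player : String), Dom_X_O_diags_lines state limit player → Pre_X_O_diags_lines state limit player → Spec_X_O_diags_lines state limit player (X_O_diags_lines state limit player)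

-- ===== LEMMAS AND PROOFS =====

-- A's inner loop reads the row only through getD at the listed indices.
def cellsLoop (player : String) : List String → Int → Bool → Int → Int → Int → Int × Int
  | [], maxC, _, _, _, spaces => (maxC, spaces)
  | c :: cs, maxC, inPl, numX, consec, spaces =>
    if c == player then
      if inPl then
        let consec' := consec + 1
        let maxC' := if consec' > maxC then consec' else maxC
        cellsLoop player cs maxC' inPl (numX + 1) consec' spaces
      else
        let consec' : Int := 1
        let maxC' := if consec' ≥ maxC then consec' else maxC
        cellsLoop player cs maxC' true (numX + 1) consec' spaces
    else if c != " " then (maxC, spaces)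
    else cellsLoop player cs maxC false numX consec (spaces + 1)

lemma aRowLoop_eq_cellsLoop (row : List String) (player : String) :
    ∀ (js : List Nat) (maxC : Int) (inPl : Bool) (numX consec spaces : Int),
      aRowLoop row player js maxC inPl numX consec spaces =
        cellsLoop player (js.map (fun j => row.getD j "")) maxC inPl numX consec spaces
  | [], _, _, _, _, _ => rfl
  | j :: js, maxC, inPl, numX, consec, spaces => by
    simp only [aRowLoop, cellsLoop, List.map_cons]
    split_ifs <;> simp [aRowLoop_eq_cellsLoop row player js]

-- B's prefix loop is takeWhile of the same cell sequence
lemma bPrefix_eq_takeWhile (row : List String) (player : String) :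
    ∀ (js : List Nat) (out : List String),
      bPrefix row player js out =
        out ++ (js.map (fun j => row.getD j "")).takeWhile (fun c => c == player || c == " ")
  | [], out => by simp [bPrefix]
  | j :: js, out => by
    simp only [bPrefix, List.map_cons, List.takeWhile_cons]
    by_cases hp : (row.getD j "" == player) = true
    · have h1 : (row.getD j "" != player && row.getD j "" != " ") = false := by
        simp only [bne, hp, Bool.not_true, Bool.false_and]
      have h2 : (row.getD j "" == player || row.getD j "" == " ") = true := by
        simp only [hp, Bool.true_or]
      rw [h1, h2]
      simp only [Bool.false_eq_true, if_false, if_true]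
      rw [bPrefix_eq_takeWhile row player js]
      simp
    · by_cases hs : (row.getD j "" == " ") = true
      · have h1 : (row.getD j "" != player && row.getD j "" != " ") = false := by
          simp only [bne, hs, Bool.not_true, Bool.and_false]
        have h2 : (row.getD j "" == player || row.getD j "" == " ") = true := by
          simp only [hs, Bool.or_true]
        rw [h1, h2]
        simp only [Bool.false_eq_true, if_false, if_true]
        rw [bPrefix_eq_takeWhile row player js]
        simp
      · have hp' : (row.getD j "" == player) = false := by simpa using hp
        have hs' : (row.getD j "" == " ") = false := by simpa using hs
        have h1 : (row.getD j "" != player && row.getD j "" != " ") = true := by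
          simp only [bne, hp', hs', Bool.not_false, Bool.and_self]
        have h2 : (row.getD j "" == player || row.getD j "" == " ") = false := by
          simp only [hp', hs', Bool.or_false]
        rw [h1, h2]
        simp

-- cellsLoop ignores everything from the first blocker on
lemma cellsLoop_takeWhile (player : String) :
    ∀ (cs : List String) (maxC : Int) (inPl : Bool) (numX consec spaces : Int),
      cellsLoop player cs maxC inPl numX consec spaces =
        cellsLoop player (cs.takeWhile (fun c => c == player || c == " ")) maxC inPl numX consec spaces
  | [], _, _, _, _, _ => rfl
  | c :: cs, maxC, inPl, numX, consec, spaces => by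
    simp only [List.takeWhile_cons]
    by_cases hp : c == player
    · simp only [hp, Bool.true_or, if_true, cellsLoop]
      split_ifs <;> exact cellsLoop_takeWhile player cs _ _ _ _ _
    · by_cases hs : c == " "
      · have hne : (c != " ") = false := by simp [bne, hs]
        simp only [hp, hs, Bool.false_or, if_true, cellsLoop, hne,
          Bool.false_eq_true, if_false]
        exact cellsLoop_takeWhile player cs _ _ _ _ _
      · simp only [hp, hs, Bool.false_or, Bool.false_eq_true, if_false, cellsLoop]
        have : (c != " ") = true := by simp [bne, hs]
        simp [hp, this]

lemma bStats_bounds (player : String) : ∀ (cs : List String),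
    0 ≤ (bStats player cs).1 ∧ 0 ≤ (bStats player cs).2.1 ∧
    (bStats player cs).2.1 ≤ (bStats player cs).1 ∧ 0 ≤ (bStats player cs).2.2
  | [] => by simp [bStats]
  | c :: cs => by
    have ih := bStats_bounds player cs
    simp only [bStats]
    split_ifs <;> simp <;> omega

-- on a blocker-free list, A's loop state collapses to B's recursive stats
lemma cellsLoop_eq_bStats (player : String) :
    ∀ (cs : List String), (∀ c ∈ cs, (c == player || c == " ") = true) →
      ∀ (maxC : Int) (inPl : Bool) (numX consec spaces : Int),
      0 ≤ (if inPl then consec else 0) → (if inPl then consec else 0) ≤ maxC →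
      cellsLoop player cs maxC inPl numX consec spaces =
        (max maxC (max (bStats player cs).1 ((if inPl then consec else 0) + (bStats player cs).2.1)),
         spaces + (bStats player cs).2.2)
  | [], _, maxC, inPl, numX, consec, spaces, h0, h1 => by
    simp only [cellsLoop, bStats]
    cases inPl <;> simp_all <;> omega
  | c :: cs, hgood, maxC, inPl, numX, consec, spaces, h0, h1 => by
    have hgood' : ∀ c ∈ cs, (c == player || c == " ") = true :=
      fun x hx => hgood x (List.mem_cons_of_mem _ hx)
    obtain ⟨hb1, hb2, hb3, hb4⟩ := bStats_bounds player cs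
    simp only [cellsLoop, bStats]
    by_cases hp : c == player
    · simp only [hp, if_true]
      cases inPl
      · simp only [Bool.false_eq_true, if_false] at h0 h1 ⊢
        rw [cellsLoop_eq_bStats player cs hgood' _ true _ _ _ (by simp) (by split_ifs <;> omega)]
        simp only [if_true]
        rw [Prod.mk.injEq]
        refine ⟨?_, rfl⟩
        split_ifs <;> omega
      · simp only [if_true] at h0 h1 ⊢
        rw [cellsLoop_eq_bStats player cs hgood' _ true _ _ _ (by simp; omega) (by split_ifs <;> omega)]
        simp only [if_true]
        rw [Prod.mk.injEq]
        refine ⟨?_, rfl⟩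
        split_ifs <;> omega
    · have hs : (c == " ") = true := by
        have := hgood c List.mem_cons_self
        simpa [hp] using this
      simp only [hp, hs, bne_self_eq_false, Bool.false_eq_true, if_false]
      rw [cellsLoop_eq_bStats player cs hgood' _ false _ _ _ (by simp) (by simpa using le_trans h0 h1)]
      simp only [Bool.false_eq_true, if_false]
      rw [Prod.mk.injEq]
      cases inPl <;> simp_all <;> omega

-- per-row agreement (holds for any row: both sides read cells through getD and stop at the first blocker)
lemma row_eq (player : String) (numCols : Nat) (row : List String) :
    aRowLoop row player (List.range numCols) 0 false 0 0 0 =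
      ((bStats player (bPrefix row player (List.range numCols) [])).1,
       (bStats player (bPrefix row player (List.range numCols) [])).2.2) := by
  rw [aRowLoop_eq_cellsLoop, bPrefix_eq_takeWhile, List.nil_append,
      cellsLoop_takeWhile player,
      cellsLoop_eq_bStats player _ (fun c hc => by simpa using List.mem_takeWhile_imp hc) 0 false 0 0 0
        (by simp) (by simp)]
  have hb := bStats_bounds player
    (((List.range numCols).map (fun j => row.getD j "")).takeWhile (fun c => c == player || c == " "))
  simp only [Bool.false_eq_true, if_false, zero_add]
  rw [Prod.mk.injEq]
  exact ⟨by omega, rfl⟩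

lemma foldl_range_getD {α β : Type} (g : β → α → β) (d : α) :
    ∀ (l : List α) (acc : β),
      (List.range l.length).foldl (fun a i => g a (l.getD i d)) acc = l.foldl g acc
  | [], acc => rfl
  | x :: l, acc => by
    rw [List.length_cons, List.range_succ_eq_map, List.foldl_cons, List.foldl_map]
    simp only [List.getD_cons_zero, List.getD_cons_succ, List.foldl_cons]
    exact foldl_range_getD g d l (g acc x)

-- ===== VERDICT (by name: the statement is the Claim_ definition above) =====
theorem X_O_diags_lines_spec : Claim_equal_X_O_diags_lines := by
  intro state limit player _ _
  unfold Spec_X_O_diags_lines X_O_diags_lines X_O_diags_lines_alt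
  rw [foldl_range_getD (fun acc row =>
        if (aRowLoop row player (List.range (state.headD []).length) 0 false 0 0 0).1 = limit ∧
           (aRowLoop row player (List.range (state.headD []).length) 0 false 0 0 0).2 ≥ 1
        then acc + 1 else acc) [] state 0]
  apply PySem.List.foldl_congr_mem
  intro acc row _
  rw [row_eq player (state.headD []).length row]
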